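-- pv_equiv track=rewrite | github.com/jslee03/Tetress-AI | agent_greedy/program_fast.py | heuristic_eval
-- ===== SOURCE A (Python) =====
-- def heuristic_eval(board, color):
--     player = 0
--     opponent = 0
--     for playerColor in board.values():
--         if playerColor == color:
--             player += 1
--         else:
--             opponent += 1
--     return player - opponent
-- ===== SOURCE B (Python) =====
-- def heuristic_eval(board, color):
--     def margin(vals):
--         if not vals:
--             return 0
--         if len(vals) == 1:
--             return 1 if vals[0] == color else -1
--         mid = len(vals) // 2
--         return margin(vals[:mid]) + margin(vals[mid:])
--     return margin(list(board.values()))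
-- ===== Notes on version B (the rewrite author's own statement) =====
-- stated objective: alternative
-- what changed: Replaces the two-accumulator linear loop with a divide-and-conquer recursion that splits the value list in half and adds the margins (+1/-1) of the halves; no counters are maintained.
import Mathlib
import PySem

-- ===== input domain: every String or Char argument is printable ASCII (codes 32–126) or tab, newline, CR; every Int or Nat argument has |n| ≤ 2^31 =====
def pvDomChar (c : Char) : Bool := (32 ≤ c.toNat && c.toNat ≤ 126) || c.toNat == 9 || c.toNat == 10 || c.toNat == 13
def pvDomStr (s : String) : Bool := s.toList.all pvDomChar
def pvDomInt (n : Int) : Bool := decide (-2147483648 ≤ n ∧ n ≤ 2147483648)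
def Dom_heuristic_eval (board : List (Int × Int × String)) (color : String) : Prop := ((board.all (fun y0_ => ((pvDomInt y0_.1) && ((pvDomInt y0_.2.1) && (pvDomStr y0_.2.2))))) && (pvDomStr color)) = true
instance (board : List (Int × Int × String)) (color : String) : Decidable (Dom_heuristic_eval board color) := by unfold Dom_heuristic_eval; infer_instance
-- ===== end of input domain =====

-- B replaces the counter loop by a divide-and-conquer recursion over the value list (alternative decomposition, same cost).
-- ===== PORT A =====
-- two accumulators (player, opponent), updated per board value in order
def heuristic_eval (board : List (Int × Int × String)) (color : String) : Int :=
  let r := board.foldl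
    (fun (acc : Int × Int) e =>
      if e.2.2 == color then (acc.1 + 1, acc.2) else (acc.1, acc.2 + 1))
    (0, 0)
  r.1 - r.2

-- ===== PORT B =====
-- margin(vals): 0 on empty, ±1 on a singleton, else split at len//2 and add the halves' margins
def pvMarginB (color : String) : List String → Int
  | [] => 0
  | [v] => if v == color then 1 else -1
  | v :: w :: rest =>
      let vs := v :: w :: rest
      let mid := vs.length / 2
      pvMarginB color (vs.take mid) + pvMarginB color (vs.drop mid)
termination_by vs => vs.length
decreasing_by
  all_goals simp only [List.length_take, List.length_drop, List.length_cons]; omega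

def heuristic_eval_alt (board : List (Int × Int × String)) (color : String) : Int :=
  pvMarginB color (board.map (fun e => e.2.2))

-- ===== PRECONDITION & SPEC =====
def Spec_heuristic_eval (board : List (Int × Int × String)) (color : String) (out : Int) : Prop := out = heuristic_eval_alt board color
instance (board : List (Int × Int × String)) (color : String) (out : Int) : Decidable (Spec_heuristic_eval board color out) := by unfold Spec_heuristic_eval; infer_instance

-- ===== CLAIM =====
def Claim_equal_heuristic_eval : Prop := ∀ (board : List (Int × Int × String)) (color : String), Dom_heuristic_eval board color → Spec_heuristic_eval board color (heuristic_eval board color)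

-- ===== LEMMAS AND PROOFS =====
-- B's divide-and-conquer margin equals 2*matches - length
theorem pvMarginB_eq (color : String) (vs : List String) :
    pvMarginB color vs = 2 * (vs.countP (fun v => v == color) : Int) - vs.length := by
  induction vs using pvMarginB.induct color with
  | case1 => simp [pvMarginB]
  | case2 v h => simp [pvMarginB, h]
  | case3 v h => simp [pvMarginB, h]
  | case4 v w rest vs mid ih1 ih2 =>
    simp only [mid, vs] at ih1 ih2
    rw [pvMarginB, ih1, ih2]
    have hc : ((v :: w :: rest).take ((v :: w :: rest).length / 2)).countP (fun v => v == color)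
        + ((v :: w :: rest).drop ((v :: w :: rest).length / 2)).countP (fun v => v == color)
        = (v :: w :: rest).countP (fun v => v == color) := by
      rw [← List.countP_append, List.take_append_drop]
    have hl : ((v :: w :: rest).take ((v :: w :: rest).length / 2)).length
        + ((v :: w :: rest).drop ((v :: w :: rest).length / 2)).length
        = (v :: w :: rest).length := by
      rw [← List.length_append, List.take_append_drop]
    omega

-- loop invariant: A's fold margin equals start margin plus 2*matches - length
theorem heuristic_eval_fold
    (color : String) (board : List (Int × Int × String)) (p o : Int) :
    (board.foldl
      (fun (acc : Int × Int) e =>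
        if e.2.2 == color then (acc.1 + 1, acc.2) else (acc.1, acc.2 + 1))
      (p, o)).1
    - (board.foldl
      (fun (acc : Int × Int) e =>
        if e.2.2 == color then (acc.1 + 1, acc.2) else (acc.1, acc.2 + 1))
      (p, o)).2
    = p - o + 2 * (board.countP (fun e => e.2.2 == color) : Int) - board.length := by
  induction board generalizing p o with
  | nil => simp
  | cons x xs ih =>
    simp only [List.foldl_cons, List.countP_cons, List.length_cons]
    by_cases h : (x.2.2 == color) = true
    · simp only [h, if_true]; rw [ih]; push_cast; ring
    · simp only [h, if_false, Bool.false_eq_true]; rw [ih]; push_cast; ring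

-- ===== VERDICT =====
theorem heuristic_eval_spec : Claim_equal_heuristic_eval := by
  intro board color _
  show _ = _
  simp only [heuristic_eval, heuristic_eval_alt]
  rw [heuristic_eval_fold, pvMarginB_eq, List.countP_map, List.length_map]
  simp only [Function.comp_def]
  ring
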